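-- pv_equiv track=rewrite | github.com/ektoravlonitis/Satellite-based-Rice-Crop-Yield-Prediction | Scripts/Scraping/Final_Weather_Exctract.py | range_constructor
-- ===== SOURCE A (Python) =====
-- def range_constructor(num):
--     '''Takes the number of days and splits it to to 14 sections'''
--     part_size = num // 14
--     ranges = []
--     start = 0
--     for _ in range(13):
--         new_range = (start , start + part_size)
--         ranges.append(new_range)
--         start += part_size
--     ranges.append((start, num))
--     return ranges
-- ===== SOURCE B (Python) =====
-- def range_constructor(num):
--     '''Takes the number of days and splits it to to 14 sections'''
--     p = num // 14
--
--     def build(k):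
--         '''Recursively build the ranges of the last k sections, k from 14 down to 1.'''
--         if k == 1:
--             return [(13 * p, num)]
--         i = 14 - k
--         return [(i * p, (i + 1) * p)] + build(k - 1)
--
--     return build(14)
-- ===== Notes on version B (the rewrite author's own statement) =====
-- stated objective: alternative
-- what changed: Replaced A's iterative loop threading a mutable list and running start with a recursive countdown that builds the last k sections from closed-form index arithmetic i = 14 - k (no accumulator state).
import Mathlib
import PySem

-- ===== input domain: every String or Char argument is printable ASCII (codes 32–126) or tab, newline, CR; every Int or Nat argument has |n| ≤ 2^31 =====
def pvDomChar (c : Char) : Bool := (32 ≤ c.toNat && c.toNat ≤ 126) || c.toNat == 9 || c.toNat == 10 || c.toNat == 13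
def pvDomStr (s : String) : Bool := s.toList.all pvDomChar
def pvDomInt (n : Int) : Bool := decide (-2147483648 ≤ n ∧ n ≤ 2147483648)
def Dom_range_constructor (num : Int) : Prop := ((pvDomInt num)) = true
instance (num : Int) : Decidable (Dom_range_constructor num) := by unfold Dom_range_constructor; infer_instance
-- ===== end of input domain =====

-- B: recursive countdown over closed-form section indices instead of A's accumulator loop (alternative decomposition, same cost).

-- ===== PORT A =====
def range_constructor (num : Int) : List (Int × Int) :=
  let part_size := PySem.Int.floordiv num 14
  let st := (PySem.List.pyRange 0 13 1).foldl
    (fun (acc : List (Int × Int) × Int) _ =>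
      (acc.1 ++ [(acc.2, acc.2 + part_size)], acc.2 + part_size))
    ([], 0)
  st.1 ++ [(st.2, num)]

-- ===== PORT B =====
-- rcBuild p num k = ranges of the last k sections (Python's inner 'build'; build is never
-- called with k = 0 in Python, Lean's k = 0 case returns []).
def rcBuild (p num : Int) : Nat → List (Int × Int)
  | 0 => []
  | 1 => [(13 * p, num)]
  | (k + 2) =>
    let i : Int := 14 - ((k : Int) + 2)
    [(i * p, (i + 1) * p)] ++ rcBuild p num (k + 1)

def range_constructor_alt (num : Int) : List (Int × Int) :=
  rcBuild (PySem.Int.floordiv num 14) num 14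

-- ===== PRECONDITION & SPEC =====
def Spec_range_constructor (num : Int) (out : List (Int × Int)) : Prop := out = range_constructor_alt num
instance (num : Int) (out : List (Int × Int)) : Decidable (Spec_range_constructor num out) := by unfold Spec_range_constructor; infer_instance

-- ===== CLAIM (what is proved, stated in full; the proofs are below) =====
def Claim_equal_range_constructor : Prop := ∀ (num : Int), Dom_range_constructor num → Spec_range_constructor num (range_constructor num)

-- ===== LEMMAS AND PROOFS =====

-- ===== VERDICT (by name: the statement is the Claim_ definition above) =====
theorem range_constructor_spec : Claim_equal_range_constructor := by
  intro num _
  show range_constructor num = range_constructor_alt num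
  have h13 : List.range 13 = [0,1,2,3,4,5,6,7,8,9,10,11,12] := by decide
  simp [range_constructor, range_constructor_alt, rcBuild, PySem.List.pyRange, h13, List.foldl]
  refine ⟨?_, ?_, ?_, ?_, ?_, ?_, ?_, ?_, ?_, ?_, ?_, ?_, ?_⟩ <;>
    first | (constructor <;> ring) | ring
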